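-- pv_equiv track=rewrite | github.com/Harsh-Trivedii/30-days-of-Python-programming | Day 17/incrementbyone.py | increment_digits_by_one
-- ===== SOURCE A (Python) =====
-- def increment_digits_by_one(number):
--     # Convert the number to a string to manipulate its digits
--     number_str = str(number)
--     result_str = ""
--     for char in number_str:
--         # Check if the character is a digit (0-9)
--         if char.isdigit():
--             new_digit = str((int(char) + 1) % 10)
--             result_str += new_digit
--         else:
--             result_str += char
--     result = int(result_str)
--     return result
-- ===== SOURCE B (Python) =====
-- def increment_digits_by_one(number):
--     # Arithmetic digit extraction: no string scan of the input, no per-char digit test.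
--     n = -number if number < 0 else number
--     s = ""
--     while n >= 10:
--         s = str((n % 10 + 1) % 10) + s
--         n //= 10
--     s = str((n + 1) % 10) + s
--     if number < 0:
--         s = "-" + s
--     return int(s)
-- ===== Notes on version B (the rewrite author's own statement) =====
-- stated objective: alternative
-- what changed: Replaces A's string scan (str(number), per-char isdigit branch, string concatenation of translated chars) by arithmetic digit extraction: a divmod loop over the absolute value builds the result digits back-to-front, so the input is never converted to a string or tested char by char.
import Mathlib
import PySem

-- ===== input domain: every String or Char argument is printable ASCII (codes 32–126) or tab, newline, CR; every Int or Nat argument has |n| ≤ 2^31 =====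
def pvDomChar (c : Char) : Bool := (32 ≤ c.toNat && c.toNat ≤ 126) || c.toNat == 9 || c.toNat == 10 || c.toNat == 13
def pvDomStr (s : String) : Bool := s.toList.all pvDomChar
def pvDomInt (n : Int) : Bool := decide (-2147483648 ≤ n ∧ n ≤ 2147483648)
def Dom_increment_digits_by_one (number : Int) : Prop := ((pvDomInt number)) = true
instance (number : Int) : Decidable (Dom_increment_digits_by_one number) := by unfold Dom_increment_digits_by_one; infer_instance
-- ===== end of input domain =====

-- B replaces A's string scan (str(number), per-char isdigit branch, string rebuild) by
-- arithmetic digit extraction with divmod, building the output back-to-front (alternative).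

-- ===== PORT A =====
def increment_digits_by_one (number : Int) : Int :=
  let number_str := PySem.Int.toChars number
  let result_str := number_str.foldl (fun acc c =>
      if PySem.Chars.isdigit c then
        -- int(char) never raises here (char is a digit), so getD 0 is never the default
        acc ++ PySem.Int.toChars (PySem.Int.mod (((PySem.Int.ofChars? [c]).getD 0) + 1) 10)
      else acc ++ [c]) ([] : List Char)
  -- int(result_str) never raises: result_str is an optionally-signed digit string
  (PySem.Int.ofChars? result_str).getD 0

-- ===== PORT B =====
-- the while loop: while n >= 10: s = str((n % 10 + 1) % 10) + s; n //= 10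
-- followed by the final s = str((n + 1) % 10) + s (the base case)
def pvAltLoop (n : Int) (s : List Char) : List Char :=
  if h : 10 ≤ n then
    pvAltLoop (PySem.Int.floordiv n 10) (PySem.Int.toChars (PySem.Int.mod (PySem.Int.mod n 10 + 1) 10) ++ s)
  else
    PySem.Int.toChars (PySem.Int.mod (n + 1) 10) ++ s
termination_by n.toNat
decreasing_by
  have h10 : PySem.Int.floordiv n 10 = n / 10 := PySem.Int.floordiv_eq_ediv_of_pos (by omega)
  rw [h10]; omega

def increment_digits_by_one_alt (number : Int) : Int :=
  let n := if number < 0 then -number else number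
  let s := pvAltLoop n []
  let s := if number < 0 then '-' :: s else s
  (PySem.Int.ofChars? s).getD 0

-- ===== PRECONDITION & SPEC =====
def Spec_increment_digits_by_one (number : Int) (out : Int) : Prop := out = increment_digits_by_one_alt number
instance (number : Int) (out : Int) : Decidable (Spec_increment_digits_by_one number out) := by unfold Spec_increment_digits_by_one; infer_instance

-- ===== CLAIM (what is proved, stated in full; the proofs are below) =====
def Claim_equal_increment_digits_by_one : Prop := ∀ (number : Int), Dom_increment_digits_by_one number → Spec_increment_digits_by_one number (increment_digits_by_one number)

-- ===== LEMMAS AND PROOFS =====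

-- structural recursion equal to Nat.toDigits 10 (proved in toDigits_eq_specDigits)
def specDigits (n : Nat) : List Char :=
  if h : n < 10 then [Nat.digitChar n]
  else specDigits (n / 10) ++ [Nat.digitChar (n % 10)]
termination_by n
decreasing_by omega

theorem toDigitsCore_eq_specDigits (f : Nat) : ∀ (n : Nat) (l : List Char), n < f →
    Nat.toDigitsCore 10 f n l = specDigits n ++ l := by
  induction f with
  | zero => intro n l h; omega
  | succ f ih =>
    intro n l h
    rw [Nat.toDigitsCore]
    by_cases h10 : n < 10
    · rw [if_pos (by omega)]
      rw [specDigits, dif_pos h10, Nat.mod_eq_of_lt h10]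
      rfl
    · rw [if_neg (by omega)]
      rw [specDigits, dif_neg h10, ih (n / 10) _ (by omega), List.append_assoc]
      rfl

theorem toDigits_eq_specDigits (n : Nat) : Nat.toDigits 10 n = specDigits n :=
  (toDigitsCore_eq_specDigits (n + 1) n [] (by omega)).trans (List.append_nil _)

-- A's per-character transformation as a single character map
def incChar (c : Char) : Char :=
  if PySem.Chars.isdigit c then Nat.digitChar ((c.toNat - 48 + 1) % 10) else c

theorem digit_enum (c : Char) (h : PySem.Chars.isdigit c = true) :
    c = '0' ∨ c = '1' ∨ c = '2' ∨ c = '3' ∨ c = '4' ∨ c = '5' ∨ c = '6' ∨ c = '7' ∨ c = '8' ∨ c = '9' := by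
  simp only [PySem.Chars.isdigit, Bool.and_eq_true, decide_eq_true_eq, Char.le_def,
    UInt32.le_iff_toNat_le] at h
  obtain ⟨h1, h2⟩ := h
  have h48 : (48 : Nat) ≤ c.val.toNat := h1
  have h57 : c.val.toNat ≤ 57 := h2
  interval_cases hn : c.val.toNat <;>
    [exact Or.inl (Char.ext (UInt32.toNat_inj.mp hn));
     exact Or.inr (Or.inl (Char.ext (UInt32.toNat_inj.mp hn)));
     exact Or.inr (Or.inr (Or.inl (Char.ext (UInt32.toNat_inj.mp hn))));
     exact Or.inr (Or.inr (Or.inr (Or.inl (Char.ext (UInt32.toNat_inj.mp hn)))));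
     exact Or.inr (Or.inr (Or.inr (Or.inr (Or.inl (Char.ext (UInt32.toNat_inj.mp hn))))));
     exact Or.inr (Or.inr (Or.inr (Or.inr (Or.inr (Or.inl (Char.ext (UInt32.toNat_inj.mp hn)))))));
     exact Or.inr (Or.inr (Or.inr (Or.inr (Or.inr (Or.inr (Or.inl (Char.ext (UInt32.toNat_inj.mp hn))))))));
     exact Or.inr (Or.inr (Or.inr (Or.inr (Or.inr (Or.inr (Or.inr (Or.inl (Char.ext (UInt32.toNat_inj.mp hn)))))))));
     exact Or.inr (Or.inr (Or.inr (Or.inr (Or.inr (Or.inr (Or.inr (Or.inr (Or.inl (Char.ext (UInt32.toNat_inj.mp hn))))))))));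
     exact Or.inr (Or.inr (Or.inr (Or.inr (Or.inr (Or.inr (Or.inr (Or.inr (Or.inr (Char.ext (UInt32.toNat_inj.mp hn))))))))))]

-- A's branch body produces exactly [incChar c]
theorem step_eq (c : Char) :
    (if PySem.Chars.isdigit c then
        PySem.Int.toChars (PySem.Int.mod (((PySem.Int.ofChars? [c]).getD 0) + 1) 10)
      else [c]) = [incChar c] := by
  by_cases h : PySem.Chars.isdigit c = true
  · rw [if_pos h]
    rcases digit_enum c h with rfl|rfl|rfl|rfl|rfl|rfl|rfl|rfl|rfl|rfl <;> decide
  · rw [if_neg h]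
    simp [incChar, h]

theorem incChar_digitChar (d : Nat) (hd : d < 10) :
    incChar (Nat.digitChar d) = Nat.digitChar ((d + 1) % 10) := by
  interval_cases d <;> decide

-- B's digit recursion on Nats (pvAltLoop computes it, proved in pvAltLoop_eq)
def specB (n : Nat) : List Char :=
  if h : n < 10 then [Nat.digitChar ((n + 1) % 10)]
  else specB (n / 10) ++ [Nat.digitChar ((n % 10 + 1) % 10)]
termination_by n
decreasing_by omega

theorem toChars_small (k : Nat) (hk : k < 10) : PySem.Int.toChars (k : Int) = [Nat.digitChar k] := by
  interval_cases k <;> decide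

theorem pvAltLoop_eq (m : Nat) : ∀ (s : List Char), pvAltLoop (m : Int) s = specB m ++ s := by
  induction m using Nat.strong_induction_on with
  | _ m ih =>
    intro s
    rw [pvAltLoop, specB]
    by_cases h10 : m < 10
    · rw [dif_neg (by omega), dif_pos h10]
      have : PySem.Int.mod ((m : Int) + 1) 10 = (((m + 1) % 10 : Nat) : Int) := by
        rw [PySem.Int.mod_eq_emod_of_pos (by omega)]; push_cast; omega
      rw [this, toChars_small _ (by omega)]
    · rw [dif_pos (by omega), dif_neg h10]
      have hmod : PySem.Int.mod (PySem.Int.mod (m : Int) 10 + 1) 10 = (((m % 10 + 1) % 10 : Nat) : Int) := by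
        rw [PySem.Int.mod_eq_emod_of_pos (by omega), PySem.Int.mod_eq_emod_of_pos (by omega)]
        push_cast; omega
      have hdiv : PySem.Int.floordiv (m : Int) 10 = ((m / 10 : Nat) : Int) := PySem.Int.floordiv_natCast m 10
      rw [hmod, toChars_small _ (by omega), hdiv,
        ih (m / 10) (by omega) _, List.append_assoc]

-- mapping A's per-character step over the digits of m gives B's digit list
theorem map_incChar_specDigits (m : Nat) : (specDigits m).map incChar = specB m := by
  induction m using Nat.strong_induction_on with
  | _ m ih =>
    rw [specDigits, specB]
    by_cases h10 : m < 10
    · rw [dif_pos h10, dif_pos h10]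
      simp [incChar_digitChar m h10]
    · rw [dif_neg h10, dif_neg h10, List.map_append, ih (m / 10) (by omega)]
      simp [incChar_digitChar (m % 10) (by omega)]

-- ===== VERDICT (by name: the statement is the Claim_ definition above) =====
theorem increment_digits_by_one_spec : Claim_equal_increment_digits_by_one := by
  intro number _
  show increment_digits_by_one number = increment_digits_by_one_alt number
  unfold increment_digits_by_one increment_digits_by_one_alt
  have hf : (fun (acc : List Char) c =>
      if PySem.Chars.isdigit c then
        acc ++ PySem.Int.toChars (PySem.Int.mod (((PySem.Int.ofChars? [c]).getD 0) + 1) 10)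
      else acc ++ [c]) =
      (fun acc c => acc ++ [incChar c]) := by
    funext acc c
    rw [← step_eq c]
    split <;> rfl
  rw [hf]
  simp only [PySem.List.foldl_append_singleton_eq_map]
  by_cases hneg : number < 0
  · have h1 : PySem.Int.toChars number = '-' :: Nat.toDigits 10 number.natAbs := by
      simp [PySem.Int.toChars, hneg]
    have h2 : (if number < 0 then -number else number) = (number.natAbs : Int) := by
      rw [if_pos hneg]; omega
    rw [h1, h2, pvAltLoop_eq, List.append_nil, if_pos hneg]
    simp only [List.map_cons]
    rw [toDigits_eq_specDigits, map_incChar_specDigits]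
    have : incChar '-' = '-' := by decide
    rw [this, List.nil_append]
  · have h1 : PySem.Int.toChars number = Nat.toDigits 10 number.toNat := by
      simp [PySem.Int.toChars, hneg]
    have h2 : (if number < 0 then -number else number) = (number.toNat : Int) := by
      rw [if_neg hneg]; omega
    rw [h1, h2, pvAltLoop_eq, List.append_nil, if_neg hneg]
    rw [toDigits_eq_specDigits, map_incChar_specDigits, List.nil_append]
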